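-- pv_equiv track=rewrite | github.com/code-anjali/reflections_art | src/reflections_judges_platform.py | allocate_judges_by_judgewise_entry
-- ===== SOURCE A (Python) =====
-- from typing import Dict, Any, List
--
-- def allocate_judges_by_judgewise_entry(judges_expertise: Dict[str, List[str]], judges_max_workload: Dict[str, int], entry_ids, categories):
--     """
--     :param judges_max_workload: precomputed manually e.g., angel -> 15, ...
--     :param judges_expertise: anjali -> [Visual arts], angel -> [Dance, Music]
--     :param entry_ids: [1,2,3 ...]
--     :param categories: [Visual arts, Music, ...]
--     :return: anjali -> [1,2,3,4,...], angel -> [3,4,5,6,7...]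
--              3 -> [anjali, angel]
--     """
--     ja = {}
--     entry_judges: Dict[str, List[str]] = {}
--     for jname, jexp in judges_expertise.items():
--         for entry_id, category in zip(entry_ids, categories):
--             if jname not in ja:
--                 ja[jname] = []
--             if category in jexp and len(ja[jname]) < int(judges_max_workload[jname]) \
--                     and (category != "Visual Arts" or len(entry_judges.get(entry_id, [])) < 2):
--                 ja[jname].append(entry_id)
--                 if entry_id not in entry_judges:
--                     entry_judges[entry_id] = []
--                 entry_judges[entry_id].append(jname)
--     return ja, entry_judges
-- ===== SOURCE B (Python) =====
-- def allocate_judges_by_judgewise_entry(judges_expertise, judges_max_workload, entry_ids, categories):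
--     ja = {}
--     entry_judges = {}
--     pairs = list(zip(entry_ids, categories))
--     if not pairs:
--         return ja, entry_judges
--     # index pair positions by category, once
--     by_cat = {}
--     for pos, (_, cat) in enumerate(pairs):
--         by_cat.setdefault(cat, []).append(pos)
--     for jname, jexp in judges_expertise.items():
--         assigned = ja.setdefault(jname, [])
--         expset = set(jexp)
--         positions = sorted(p for c, ps in by_cat.items() if c in expset for p in ps)
--         if not positions:
--             continue
--         cap = int(judges_max_workload[jname])
--         for pos in positions:
--             if len(assigned) >= cap:
--                 break
--             eid, cat = pairs[pos]
--             if cat != "Visual Arts" or len(entry_judges.get(eid, [])) < 2: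
--                 assigned.append(eid)
--                 entry_judges.setdefault(eid, []).append(jname)
--     return ja, entry_judges
-- ===== Notes on version B (the rewrite author's own statement) =====
-- stated objective: alternative
-- what changed: B builds a category->positions index over the zipped (entry, category) pairs once and, per judge, walks only the sorted matched positions (set-based expertise lookup) with an early break at the workload cap, instead of A's per-judge full scan of every pair with a linear expertise-list membership test.
import Mathlib
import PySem

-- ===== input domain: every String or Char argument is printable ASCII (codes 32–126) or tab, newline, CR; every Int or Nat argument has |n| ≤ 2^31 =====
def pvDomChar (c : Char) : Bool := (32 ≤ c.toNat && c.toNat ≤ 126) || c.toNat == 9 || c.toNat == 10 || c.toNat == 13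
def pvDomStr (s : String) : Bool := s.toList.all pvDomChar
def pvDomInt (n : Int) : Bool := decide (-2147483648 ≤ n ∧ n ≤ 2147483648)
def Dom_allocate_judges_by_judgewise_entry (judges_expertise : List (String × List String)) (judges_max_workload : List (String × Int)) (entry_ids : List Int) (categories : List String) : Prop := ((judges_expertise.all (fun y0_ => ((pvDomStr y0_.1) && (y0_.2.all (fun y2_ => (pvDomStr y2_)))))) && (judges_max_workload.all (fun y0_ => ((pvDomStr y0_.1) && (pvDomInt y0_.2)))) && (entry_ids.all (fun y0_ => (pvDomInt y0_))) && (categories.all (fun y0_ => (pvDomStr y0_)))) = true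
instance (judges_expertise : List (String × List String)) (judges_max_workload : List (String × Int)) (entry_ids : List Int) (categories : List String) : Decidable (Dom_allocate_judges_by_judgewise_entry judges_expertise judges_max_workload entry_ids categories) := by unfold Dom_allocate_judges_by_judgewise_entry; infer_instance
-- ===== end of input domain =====

-- B replaces A's full scan of all (entry, category) pairs per judge by a category→positions
-- index built once, set-based expertise filtering and an early exit at the workload cap
-- (objective: alternative). Return-value equivalence; neither version mutates its arguments.

-- ===== PORT A =====
-- A's inner loop body: state is (ja, entry_judges); p = (entry_id, category)
def ajA_inner (wl : Int) (jn : String) (jexp : List String)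
    (s : PySem.Dict String (List Int) × PySem.Dict Int (List String)) (p : Int × String) :
    PySem.Dict String (List Int) × PySem.Dict Int (List String) :=
  let ja := if s.1.contains jn then s.1 else s.1.insert jn []
  if p.2 ∈ jexp ∧ ((ja.getD jn []).length : Int) < wl ∧
      (p.2 ≠ "Visual Arts" ∨ (s.2.getD p.1 []).length < 2) then
    (ja.modify jn [] (· ++ [p.1]),
     (if s.2.contains p.1 then s.2 else s.2.insert p.1 []).modify p.1 [] (· ++ [jn]))
  else (ja, s.2)

def allocate_judges_by_judgewise_entry (judges_expertise : List (String × List String)) (judges_max_workload : List (String × Int)) (entry_ids : List Int) (categories : List String) : (List (String × List Int)) × (List (Int × List String)) :=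
  let pairs := entry_ids.zip categories
  let r := judges_expertise.foldl
    (fun s j => pairs.foldl (ajA_inner ((List.lookup j.1 judges_max_workload).getD 0) j.1 j.2) s)
    (PySem.Dict.empty, PySem.Dict.empty)
  (r.1.items, r.2.items)

-- ===== PORT B =====
-- B's capped consumption of the matched positions (the 'for pos in positions' loop with break)
def ajB_loop (cap : Int) (jn : String) (pairs : List (Int × String)) :
    List Int → PySem.Dict String (List Int) × PySem.Dict Int (List String) →
    PySem.Dict String (List Int) × PySem.Dict Int (List String)
  | [], s => s
  | pos :: rest, s =>
    if cap ≤ ((s.1.getD jn []).length : Int) then s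
    else
      let p := PySem.List.pyGetD pairs pos (0, "")
      if p.2 ≠ "Visual Arts" ∨ (s.2.getD p.1 []).length < 2 then
        ajB_loop cap jn pairs rest
          (s.1.modify jn [] (· ++ [p.1]), (s.2.setdefault p.1 []).modify p.1 [] (· ++ [jn]))
      else ajB_loop cap jn pairs rest s

def allocate_judges_by_judgewise_entry_alt (judges_expertise : List (String × List String)) (judges_max_workload : List (String × Int)) (entry_ids : List Int) (categories : List String) : (List (String × List Int)) × (List (Int × List String)) :=
  let pairs := entry_ids.zip categories
  if pairs.isEmpty then ([], [])
  else
    let by_cat : PySem.Dict String (List Int) :=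
      (PySem.List.enumerate pairs 0).foldl (fun d pc => d.modify pc.2.2 [] (· ++ [pc.1])) PySem.Dict.empty
    let r := judges_expertise.foldl
      (fun s j =>
        let ja1 := s.1.setdefault j.1 []
        let expset := PySem.Set.ofList j.2
        let positions := PySem.List.sorted
          ((by_cat.items.filter (fun q => PySem.Set.contains expset q.1)).flatMap (fun q => q.2))
          (fun x => x) false
        if positions.isEmpty then (ja1, s.2)
        else ajB_loop ((List.lookup j.1 judges_max_workload).getD 0) j.1 pairs positions (ja1, s.2))
      (PySem.Dict.empty, PySem.Dict.empty)
    (r.1.items, r.2.items)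

-- ===== PRECONDITION & SPEC =====
-- Pre_ excludes exactly the inputs where Python A raises KeyError: a judge whose expertise
-- matches some (entry, category) pair but who is missing from judges_max_workload.
def Pre_allocate_judges_by_judgewise_entry (judges_expertise : List (String × List String)) (judges_max_workload : List (String × Int)) (entry_ids : List Int) (categories : List String) : Prop :=
  ∀ p ∈ judges_expertise, (∃ q ∈ entry_ids.zip categories, q.2 ∈ p.2) →
    (List.lookup p.1 judges_max_workload).isSome = true
instance (judges_expertise : List (String × List String)) (judges_max_workload : List (String × Int)) (entry_ids : List Int) (categories : List String) : Decidable (Pre_allocate_judges_by_judgewise_entry judges_expertise judges_max_workload entry_ids categories) := by unfold Pre_allocate_judges_by_judgewise_entry; infer_instance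

def pvWitness_allocate_judges_by_judgewise_entry : (List (String × List String)) × (List (String × Int)) × List Int × List String :=
  ([("anjali", ["Music"]), ("angel", ["Dance"])], [("anjali", 2), ("angel", 1)], [1, 2], ["Music", "Dance"])

def Spec_allocate_judges_by_judgewise_entry (judges_expertise : List (String × List String)) (judges_max_workload : List (String × Int)) (entry_ids : List Int) (categories : List String) (out : (List (String × List Int)) × (List (Int × List String))) : Prop := out = allocate_judges_by_judgewise_entry_alt judges_expertise judges_max_workload entry_ids categories
instance (judges_expertise : List (String × List String)) (judges_max_workload : List (String × Int)) (entry_ids : List Int) (categories : List String) (out : (List (String × List Int)) × (List (Int × List String))) : Decidable (Spec_allocate_judges_by_judgewise_entry judges_expertise judges_max_workload entry_ids categories out) := by unfold Spec_allocate_judges_by_judgewise_entry; infer_instance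

-- ===== CLAIM (what is proved, stated in full; the proofs are below) =====
def Claim_equal_allocate_judges_by_judgewise_entry : Prop := ∀ (judges_expertise : List (String × List String)) (judges_max_workload : List (String × Int)) (entry_ids : List Int) (categories : List String), Dom_allocate_judges_by_judgewise_entry judges_expertise judges_max_workload entry_ids categories → Pre_allocate_judges_by_judgewise_entry judges_expertise judges_max_workload entry_ids categories → Spec_allocate_judges_by_judgewise_entry judges_expertise judges_max_workload entry_ids categories (allocate_judges_by_judgewise_entry judges_expertise judges_max_workload entry_ids categories)

-- ===== LEMMAS AND PROOFS =====

-- the 'setdefault' part of A's inner body, pulled out once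
def ajSd (jn : String) (s : PySem.Dict String (List Int) × PySem.Dict Int (List String)) :
    PySem.Dict String (List Int) × PySem.Dict Int (List String) :=
  (if s.1.contains jn then s.1 else s.1.insert jn [], s.2)

theorem ajA_inner_sd (wl : Int) (jn : String) (jexp : List String) (s) (p : Int × String) :
    ajA_inner wl jn jexp s p = ajA_inner wl jn jexp (ajSd jn s) p := by
  unfold ajA_inner ajSd
  by_cases hc : s.1.contains jn = true <;>
    simp [hc, PySem.Dict.contains_insert_self]

theorem ajA_foldl_sd (wl : Int) (jn : String) (jexp : List String) (l : List (Int × String))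
    (hl : l ≠ []) (s) :
    l.foldl (ajA_inner wl jn jexp) s = l.foldl (ajA_inner wl jn jexp) (ajSd jn s) := by
  cases l with
  | nil => exact absurd rfl hl
  | cons p rest => simp only [List.foldl_cons, ajA_inner_sd wl jn jexp s p]

-- A's scan does nothing once the workload cap is reached
theorem ajA_foldl_capped (wl : Int) (jn : String) (jexp : List String) (l : List (Int × String)) (s)
    (hc : s.1.contains jn = true) (hw : ¬ ((s.1.getD jn []).length : Int) < wl) :
    l.foldl (ajA_inner wl jn jexp) s = s := by
  induction l with
  | nil => rfl
  | cons p rest ih =>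
    have hstep : ajA_inner wl jn jexp s p = s := by
      unfold ajA_inner
      simp [hc, hw]
    simp only [List.foldl_cons, hstep, ih]

-- core scan equivalence: A's guarded full scan = B's capped walk over the matched positions
theorem ajA_scan (wl : Int) (jn : String) (jexp : List String) (pairs : List (Int × String))
    (q : List (Int × (Int × String))) (hq : ∀ x ∈ q, PySem.List.pyGetD pairs x.1 (0, "") = x.2) (s)
    (hc : s.1.contains jn = true) :
    (q.map (·.2)).foldl (ajA_inner wl jn jexp) s
      = ajB_loop wl jn pairs ((q.filter (fun x => decide (x.2.2 ∈ jexp))).map (·.1)) s := by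
  induction q generalizing s with
  | nil => rfl
  | cons x q' ih =>
    obtain ⟨i, p⟩ := x
    have hqi : PySem.List.pyGetD pairs i (0, "") = p := hq (i, p) List.mem_cons_self
    have hq' : ∀ x ∈ q', PySem.List.pyGetD pairs x.1 (0, "") = x.2 :=
      fun x hx => hq x (List.mem_cons_of_mem _ hx)
    by_cases hm : p.2 ∈ jexp
    · have hB : ∀ L, ajB_loop wl jn pairs (i :: L) s =
        if wl ≤ ((s.1.getD jn []).length : Int) then s
        else
          if p.2 ≠ "Visual Arts" ∨ (s.2.getD p.1 []).length < 2 then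
            ajB_loop wl jn pairs L
              (s.1.modify jn [] (· ++ [p.1]), (s.2.setdefault p.1 []).modify p.1 [] (· ++ [jn]))
          else ajB_loop wl jn pairs L s := by
        intro L
        rw [ajB_loop, hqi]
      have hfilter : List.filter (fun x => decide (x.2.2 ∈ jexp)) ((i, p) :: q')
          = (i, p) :: List.filter (fun x => decide (x.2.2 ∈ jexp)) q' := by
        simp [hm]
      by_cases hw : ((s.1.getD jn []).length : Int) < wl
      · by_cases hva : p.2 ≠ "Visual Arts" ∨ (s.2.getD p.1 []).length < 2
        · have hstep : ajA_inner wl jn jexp s (i, p).2 =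
            (s.1.modify jn [] (· ++ [p.1]), (s.2.setdefault p.1 []).modify p.1 [] (· ++ [jn])) := by
            unfold ajA_inner
            simp only [hc, if_true]
            rw [if_pos ⟨hm, hw, hva⟩]
            by_cases he : s.2.contains p.1 = true
            · rw [PySem.Dict.setdefault_of_contains _ _ he, if_pos he]
            · rw [PySem.Dict.setdefault_of_not_contains _ _ (by simpa using he),
                if_neg he]
          have hc' : (s.1.modify jn [] (· ++ [p.1])).contains jn = true := by
            simp [PySem.Dict.contains_modify, hc]
          simp only [List.map_cons, List.foldl_cons, hfilter, List.map_cons, hstep, hB,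
            if_neg (not_le.mpr hw), if_pos hva]
          exact ih hq' _ hc'
        · have hstep : ajA_inner wl jn jexp s (i, p).2 = s := by
            unfold ajA_inner
            simp only [hc, if_true]
            rw [if_neg (by tauto), Prod.mk.eta]
          simp only [List.map_cons, List.foldl_cons, hfilter, hstep, hB,
            if_neg (not_le.mpr hw), if_neg hva]
          exact ih hq' _ hc
      · have hstep : ajA_inner wl jn jexp s (i, p).2 = s := by
          unfold ajA_inner
          simp only [hc, if_true]
          rw [if_neg (by tauto), Prod.mk.eta]
        simp only [List.map_cons, List.foldl_cons, hfilter, hstep, hB,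
          if_pos (not_lt.mp hw)]
        rw [ajA_foldl_capped wl jn jexp _ s hc hw]
    · have hfilter : List.filter (fun x => decide (x.2.2 ∈ jexp)) ((i, p) :: q')
          = List.filter (fun x => decide (x.2.2 ∈ jexp)) q' := by
        simp [hm]
      have hstep : ajA_inner wl jn jexp s (i, p).2 = s := by
        unfold ajA_inner
        simp only [hc, if_true]
        rw [if_neg (by tauto), Prod.mk.eta]
      simp only [List.map_cons, List.foldl_cons, hfilter, hstep]
      exact ih hq' _ hc

-- B's sorted flatMap over the category index = the matched positions in pair order
theorem positions_char (pairs : List (Int × String)) (jexp : List String) :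
    PySem.List.sorted
      (((((PySem.List.enumerate pairs 0).foldl
            (fun d pc => d.modify pc.2.2 [] (· ++ [pc.1])) PySem.Dict.empty : PySem.Dict String (List Int))).items.filter
          (fun q => PySem.Set.contains (PySem.Set.ofList jexp) q.1)).flatMap (fun q => q.2))
      (fun x => x) false
    = ((PySem.List.enumerate pairs 0).filter (fun x => decide (x.2.2 ∈ jexp))).map (·.1) := by
  -- abbreviations
  have hfold : (PySem.List.enumerate pairs 0).foldl
      (fun d pc => d.modify pc.2.2 [] (· ++ [pc.1])) (PySem.Dict.empty : PySem.Dict String (List Int))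
      = ((PySem.List.enumerate pairs 0).map (fun pc => (pc.2.2, pc.1))).foldl
          (fun d p => d.modify p.1 [] (· ++ [p.2])) PySem.Dict.empty := by
    rw [List.foldl_map]
  have hgetD : ∀ c, ((PySem.List.enumerate pairs 0).foldl
      (fun d pc => d.modify pc.2.2 [] (· ++ [pc.1])) (PySem.Dict.empty : PySem.Dict String (List Int))).getD c []
      = ((((PySem.List.enumerate pairs 0).map (fun pc => (pc.2.2, pc.1))).filter
          (fun p => p.1 == c)).map (·.2)) := by
    intro c
    rw [hfold, PySem.Dict.getD_foldl_modify_append, PySem.Dict.getD_empty, List.nil_append]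
  have hchunkmem : ∀ (c : String) (a : Int),
      a ∈ ((((PySem.List.enumerate pairs 0).map (fun pc => (pc.2.2, pc.1))).filter
          (fun p => p.1 == c)).map (·.2))
      ↔ ∃ (k : Nat) (_ : k < pairs.length), a = (k : Int) ∧ pairs[k].2 = c := by
    intro c a
    simp only [List.mem_map, List.mem_filter, PySem.List.mem_enumerate_iff]
    constructor
    · rintro ⟨p, ⟨⟨pc, ⟨⟨k, hk, rfl⟩, rfl⟩⟩, hpc⟩, rfl⟩
      exact ⟨k, hk, by simp, by simpa using hpc⟩
    · rintro ⟨k, hk, rfl, hc⟩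
      exact ⟨(pairs[k].2, (k : Int)), ⟨⟨((k : Int), pairs[k]), ⟨⟨k, hk, by simp⟩, rfl⟩⟩, by simpa using hc⟩, rfl⟩
  have hchunknodup : ∀ c : String, (((((PySem.List.enumerate pairs 0).map (fun pc => (pc.2.2, pc.1))).filter
      (fun p => p.1 == c)).map (·.2))).Nodup := by
    intro c
    have h1 : (((PySem.List.enumerate pairs 0).map (fun pc => (pc.2.2, pc.1)))).Pairwise
        (fun a b => a.2 < b.2) :=
      (List.pairwise_map).mpr (PySem.List.pairwise_lt_enumerate pairs 0)
    have h2 := (List.pairwise_map (f := fun p : String × Int => p.2)).mpr (h1.filter (fun p => p.1 == c))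
    exact h2.imp ne_of_lt
  have hkeys : ((PySem.List.enumerate pairs 0).foldl
      (fun d pc => d.modify pc.2.2 [] (· ++ [pc.1])) (PySem.Dict.empty : PySem.Dict String (List Int))).keys
      = PySem.Set.ofList ((PySem.List.enumerate pairs 0).map (·.2.2)) := by
    rw [PySem.Dict.keys_foldl_modify_key (PySem.List.enumerate pairs 0) (fun pc => pc.2.2) []
      (fun _ pc v => v ++ [pc.1]) PySem.Dict.empty, PySem.Dict.keys_empty, PySem.Set.update_nil_left]
  have hnodupkeys : ((PySem.List.enumerate pairs 0).foldl
      (fun d pc => d.modify pc.2.2 [] (· ++ [pc.1])) (PySem.Dict.empty : PySem.Dict String (List Int))).keys.Nodup := by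
    rw [hkeys]; exact PySem.Set.nodup_ofList _
  -- rewrite items as a map over the (nodup) keys, pull filter and flatMap inside
  rw [PySem.Dict.items_eq_map_keys _ hnodupkeys [], List.filter_map, List.flatMap_map]
  -- now: sorted (ks.flatMap (fun c => getD c [])) = target, with ks := keys.filter (expset-membership)
  apply PySem.List.sorted_eq_of_perm_of_pairwise_lt
  · -- permutation between matched positions and the index chunks
    have hcontains : ∀ c : String, ((PySem.Set.ofList jexp).contains c = true) ↔ c ∈ jexp := by
      intro c
      simp [PySem.Set.contains, PySem.Set.mem_ofList]
    have hdisj : ∀ c c' : String, c ≠ c' →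
        List.Disjoint
          (((((PySem.List.enumerate pairs 0).map (fun pc => (pc.2.2, pc.1))).filter
            (fun p => p.1 == c)).map (·.2)))
          (((((PySem.List.enumerate pairs 0).map (fun pc => (pc.2.2, pc.1))).filter
            (fun p => p.1 == c')).map (·.2))) := by
      intro c c' hne a ha ha'
      obtain ⟨k, hk, rfl, hc⟩ := (hchunkmem c a).mp ha
      obtain ⟨k', hk', hkk, hc'⟩ := (hchunkmem c' _).mp ha'
      have : k = k' := by exact_mod_cast hkk
      exact hne (hc ▸ this ▸ hc')
    have hnd1 : (((PySem.List.enumerate pairs 0).filter (fun x => decide (x.2.2 ∈ jexp))).map (·.1)).Nodup := by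
      have h2 := (List.pairwise_map (f := fun p : Int × (Int × String) => p.1)).mpr
        ((PySem.List.pairwise_lt_enumerate pairs 0).filter (fun x => decide (x.2.2 ∈ jexp)))
      exact h2.imp ne_of_lt
    simp only [Function.comp_def]
    have hnd2 : (List.flatMap
        (fun a => ((List.foldl (fun d pc => d.modify pc.2.2 [] fun x => x ++ [pc.1]) PySem.Dict.empty
            (PySem.List.enumerate pairs 0)).getD a []))
        (List.filter (fun k => (PySem.Set.ofList jexp).contains k)
          (List.foldl (fun d pc => d.modify pc.2.2 [] fun x => x ++ [pc.1]) PySem.Dict.empty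
            (PySem.List.enumerate pairs 0)).keys)).Nodup := by
      rw [List.nodup_flatMap]
      constructor
      · intro c _
        rw [hgetD c]
        exact hchunknodup c
      · refine List.Pairwise.imp ?_ ((hnodupkeys.filter _))
        intro c c' hne
        simp only [Function.onFun]
        rw [hgetD c, hgetD c']
        exact hdisj c c' hne
    rw [List.perm_ext_iff_of_nodup hnd1 hnd2]
    intro a
    rw [List.mem_flatMap]
    constructor
    · rintro hmem
      obtain ⟨x, hx, rfl⟩ := List.mem_map.mp hmem
      obtain ⟨hxe, hxj⟩ := List.mem_filter.mp hx
      obtain ⟨k, hk, rfl⟩ := (PySem.List.mem_enumerate_iff pairs 0 x).mp hxe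
      refine ⟨pairs[k].2, ?_, ?_⟩
      · rw [List.mem_filter]
        constructor
        · rw [hkeys, PySem.Set.mem_ofList, List.mem_map]
          exact ⟨((k : Int), pairs[k]), (PySem.List.mem_enumerate_iff pairs 0 _).mpr ⟨k, hk, by simp⟩, rfl⟩
        · rw [hcontains]
          simpa using hxj
      · rw [hgetD]
        exact (hchunkmem _ _).mpr ⟨k, hk, by simp, rfl⟩
    · rintro ⟨c, hcks, ha⟩
      rw [hgetD] at ha
      obtain ⟨k, hk, rfl, hc⟩ := (hchunkmem c _).mp ha
      obtain ⟨_, hcj⟩ := List.mem_filter.mp hcks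
      rw [hcontains] at hcj
      rw [List.mem_map]
      refine ⟨((k : Int), pairs[k]), List.mem_filter.mpr ⟨(PySem.List.mem_enumerate_iff pairs 0 _).mpr ⟨k, hk, by simp⟩, by simpa [hc] using hcj⟩, rfl⟩
  · have h2 := (List.pairwise_map (f := fun p : Int × (Int × String) => p.1)).mpr
      ((PySem.List.pairwise_lt_enumerate pairs 0).filter (fun x => decide (x.2.2 ∈ jexp)))
    exact h2

-- one judge's pass of A = one judge's step of B
theorem judge_step (wll : List (String × Int)) (pairs : List (Int × String)) (hp : pairs ≠ [])
    (j : String × List String) (s : PySem.Dict String (List Int) × PySem.Dict Int (List String)) :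
    pairs.foldl (ajA_inner ((List.lookup j.1 wll).getD 0) j.1 j.2) s
    = (let ja1 := s.1.setdefault j.1 []
       let expset := PySem.Set.ofList j.2
       let positions := PySem.List.sorted
         (((((PySem.List.enumerate pairs 0).foldl (fun d pc => d.modify pc.2.2 [] (· ++ [pc.1]))
             PySem.Dict.empty : PySem.Dict String (List Int))).items.filter
               (fun q => PySem.Set.contains expset q.1)).flatMap (fun q => q.2))
         (fun x => x) false
       if positions.isEmpty then (ja1, s.2)
       else ajB_loop ((List.lookup j.1 wll).getD 0) j.1 pairs positions (ja1, s.2)) := by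
  have hsd1 : s.1.setdefault j.1 [] = (ajSd j.1 s).1 := by
    by_cases hc : s.1.contains j.1 = true
    · rw [PySem.Dict.setdefault_of_contains _ _ hc]; simp [ajSd, hc]
    · rw [PySem.Dict.setdefault_of_not_contains _ _ (by simpa using hc)]; simp [ajSd, hc]
  have hc' : (ajSd j.1 s).1.contains j.1 = true := by
    unfold ajSd
    by_cases hc : s.1.contains j.1 = true <;> simp [hc, PySem.Dict.contains_insert_self]
  have hq : ∀ x ∈ PySem.List.enumerate pairs 0, PySem.List.pyGetD pairs x.1 (0, "") = x.2 := by
    intro x hx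
    obtain ⟨k, hk, rfl⟩ := (PySem.List.mem_enumerate_iff pairs 0 x).mp hx
    simp [PySem.List.pyGetD_natCast, hk]
  have hscan := ajA_scan ((List.lookup j.1 wll).getD 0) j.1 j.2 pairs
    (PySem.List.enumerate pairs 0) hq (ajSd j.1 s) hc'
  rw [PySem.List.map_snd_enumerate] at hscan
  rw [ajA_foldl_sd _ _ _ _ hp, hscan]
  simp only [positions_char pairs j.2, hsd1]
  by_cases hM : (((PySem.List.enumerate pairs 0).filter
      (fun x => decide (x.2.2 ∈ j.2))).map (·.1)).isEmpty
  · rw [List.isEmpty_iff.mp hM]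
    simp [ajB_loop, ajSd]
  · rw [if_neg (by simpa using hM)]
    rfl

-- the whole loop over judges
theorem fold_judges (wll : List (String × Int)) (pairs : List (Int × String)) (hp : pairs ≠ [])
    (je : List (String × List String))
    (s : PySem.Dict String (List Int) × PySem.Dict Int (List String)) :
    je.foldl (fun s j => pairs.foldl (ajA_inner ((List.lookup j.1 wll).getD 0) j.1 j.2) s) s
    = je.foldl (fun s j =>
        let ja1 := s.1.setdefault j.1 []
        let expset := PySem.Set.ofList j.2
        let positions := PySem.List.sorted
          (((((PySem.List.enumerate pairs 0).foldl (fun d pc => d.modify pc.2.2 [] (· ++ [pc.1]))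
              PySem.Dict.empty : PySem.Dict String (List Int))).items.filter
                (fun q => PySem.Set.contains expset q.1)).flatMap (fun q => q.2))
          (fun x => x) false
        if positions.isEmpty then (ja1, s.2)
        else ajB_loop ((List.lookup j.1 wll).getD 0) j.1 pairs positions (ja1, s.2)) s := by
  induction je generalizing s with
  | nil => rfl
  | cons j je ih =>
    simp only [List.foldl_cons]
    rw [judge_step wll pairs hp j s, ih]

-- ===== VERDICT (by name: the statement is the Claim_ definition above) =====
theorem allocate_judges_by_judgewise_entry_spec : Claim_equal_allocate_judges_by_judgewise_entry := by
  intro je wll eids cats _hdom _hpre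
  show _ = allocate_judges_by_judgewise_entry_alt je wll eids cats
  unfold allocate_judges_by_judgewise_entry allocate_judges_by_judgewise_entry_alt
  by_cases hz : (eids.zip cats).isEmpty
  · rw [List.isEmpty_iff.mp hz]
    simp only [List.isEmpty_nil, if_true, List.foldl_nil, List.foldl_fixed]
    exact rfl
  · have hp : eids.zip cats ≠ [] := by simpa [List.isEmpty_iff] using hz
    have hzf : (eids.zip cats).isEmpty = false := by simpa using hz
    simp only [hzf, Bool.false_eq_true, if_false]
    rw [fold_judges wll (eids.zip cats) hp je]
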